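-- pv_equiv track=rewrite | github.com/Srutarshi/Lossy-Neuromorphic-Event-Compression | qt_orient.py | orient
-- ===== SOURCE A (Python) =====
-- def orient(l,i,o):
--     oli = o[l][i]                    # the index changes here than in MATLAB
--     o[l-1][4*i] = (5-oli)%4          # the index changes here than in MATLAB
--     o[l-1][(4*i)+1] = oli            # the index changes here than in MATLAB
--     o[l-1][(4*i)+2] = oli            # the index changes here than in MATLAB
--     o[l-1][(4*i)+3] = 3 - oli        # the index changes here than in MATLAB
--
--     if (l-1) > 0:                    # change in index here than in MATLAB
--         o = orient(l-1, 4*i, o)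
--         o = orient(l-1, (4*i)+1, o)
--         o = orient(l-1, (4*i)+2, o)
--         o = orient(l-1, (4*i)+3, o)
--
--     return o
-- ===== SOURCE B (Python) =====
-- def orient(l, i, o):
--     # Iterative re-implementation: explicit DFS worklist instead of recursion.
--     stack = [(l, i)]
--     while stack:
--         level, idx = stack.pop()
--         oli = o[level][idx]
--         o[level - 1][4 * idx] = (5 - oli) % 4
--         o[level - 1][4 * idx + 1] = oli
--         o[level - 1][4 * idx + 2] = oli
--         o[level - 1][4 * idx + 3] = 3 - oli
--         if level - 1 > 0:
--             for k in (3, 2, 1, 0):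
--                 stack.append((level - 1, 4 * idx + k))
--     return o
-- ===== Notes on version B (the rewrite author's own statement) =====
-- stated objective: alternative
-- what changed: The four-way recursion is replaced by an iterative explicit-stack worklist loop (children pushed in reverse so the LIFO pop reproduces the recursion's depth-first write order), with no recursion at all.
import Mathlib
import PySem

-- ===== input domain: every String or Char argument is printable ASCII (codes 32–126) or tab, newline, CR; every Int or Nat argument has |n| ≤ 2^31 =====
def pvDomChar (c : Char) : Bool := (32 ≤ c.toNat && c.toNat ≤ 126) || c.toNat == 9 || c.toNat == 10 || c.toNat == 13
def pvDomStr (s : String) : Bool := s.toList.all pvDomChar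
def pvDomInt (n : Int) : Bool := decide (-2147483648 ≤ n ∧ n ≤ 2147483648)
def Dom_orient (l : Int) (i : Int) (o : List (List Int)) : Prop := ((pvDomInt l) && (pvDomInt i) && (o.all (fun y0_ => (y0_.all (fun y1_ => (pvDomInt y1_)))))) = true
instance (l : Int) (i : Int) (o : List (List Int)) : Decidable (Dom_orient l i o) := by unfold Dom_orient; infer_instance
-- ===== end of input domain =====

-- B replaces the recursion by an explicit worklist loop (same write order: children pushed reversed
-- onto a LIFO stack); objective: alternative decomposition, same cost.
-- Both A and B mutate the rows of `o` in place in Python; the equivalence proved here is about the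
-- returned value (which is the same mutated object in both).

-- shared primitives (exact Python semantics, both Pythons use the identical expressions):
-- o[k][j] read with Python's negative-index rule; total form, exact under Pre_'s InRange conditions
def qtGet (o : List (List Int)) (k j : Int) : Int :=
  PySem.List.pyGetD (PySem.List.pyGetD o k []) j 0

-- o[k][j] = v with Python's negative-index rule; total form, exact under Pre_'s InRange conditions
def qtSet (o : List (List Int)) (k j : Int) (v : Int) : List (List Int) :=
  PySem.List.pySetD o k (PySem.List.pySetD (PySem.List.pyGetD o k []) j v)

-- the read + four writes every node performs (identical lines in both Pythons)
def qtStep (l i : Int) (o : List (List Int)) : List (List Int) :=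
  let oli := qtGet o l i
  qtSet (qtSet (qtSet (qtSet o (l-1) (4*i) (PySem.Int.mod (5 - oli) 4))
      (l-1) (4*i+1) oli) (l-1) (4*i+2) oli) (l-1) (4*i+3) (3 - oli)

-- ===== PORT A =====
def orient (l : Int) (i : Int) (o : List (List Int)) : List (List Int) :=
  let o1 := qtStep l i o
  if h : l - 1 > 0 then
    let o2 := orient (l-1) (4*i) o1
    let o3 := orient (l-1) (4*i+1) o2
    let o4 := orient (l-1) (4*i+2) o3
    orient (l-1) (4*i+3) o4
  else o1
termination_by l.toNat
decreasing_by all_goals omega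

-- ===== PORT B =====
-- the while loop of Source B; stack head = Python's list end (pop/append site)
def orientLoop (stack : List (Int × Int)) (o : List (List Int)) : List (List Int) :=
  match stack with
  | [] => o
  | (level, idx) :: rest =>
    let o1 := qtStep level idx o
    if h : level - 1 > 0 then
      orientLoop ((level-1, 4*idx) :: (level-1, 4*idx+1) :: (level-1, 4*idx+2) ::
                  (level-1, 4*idx+3) :: rest) o1
    else
      orientLoop rest o1
termination_by (stack.map (fun p => 5 ^ p.1.toNat)).sum
decreasing_by
  · simp only [List.map_cons, List.sum_cons]
    have ht : (level - 1).toNat + 1 = level.toNat := by omega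
    have h5 : 5 ^ level.toNat = 5 ^ (level - 1).toNat * 5 := by
      rw [← ht, pow_succ]
    have hp : 0 < 5 ^ (level - 1).toNat := Nat.pow_pos (by norm_num)
    omega
  · simp only [List.map_cons, List.sum_cons]
    have hp : 0 < 5 ^ level.toNat := Nat.pow_pos (by norm_num)
    omega

def orient_alt (l : Int) (i : Int) (o : List (List Int)) : List (List Int) :=
  orientLoop [(l, i)] o

-- ===== PRECONDITION & SPEC =====
-- length of the row o[k] under Python's negative-index rule (0 when k is out of range)
def rowLen (o : List (List Int)) (k : Int) : Nat :=
  (PySem.List.pyGetD o k []).length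

-- Pre_: exactly the inputs on which Python's orient returns (no IndexError): every cell the
-- recursion reads or writes is in range under Python's negative-index rule.  For l ≥ 1 the
-- recursion touches, in row r (0 ≤ r ≤ l), exactly the indices 4^(l-r)*i + j, 0 ≤ j < 4^(l-r);
-- for l ≤ 0 only the single read o[l][i] and the four writes o[l-1][4i..4i+3] happen.
def Pre_orient (l : Int) (i : Int) (o : List (List Int)) : Prop :=
  if 1 ≤ l then
    l < (o.length : Int) ∧
    ∀ r : ℕ, r ≤ l.toNat → ∀ j : ℕ, j < 4 ^ (l.toNat - r) →
      PySem.Raise.InRange (rowLen o (r : Int)) (((4 ^ (l.toNat - r) : ℕ) : Int) * i + (j : Int))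
  else
    PySem.Raise.InRange o.length l ∧ PySem.Raise.InRange (rowLen o l) i ∧
    PySem.Raise.InRange o.length (l - 1) ∧
    ∀ t : ℕ, t < 4 → PySem.Raise.InRange (rowLen o (l - 1)) (4 * i + (t : Int))
instance (l : Int) (i : Int) (o : List (List Int)) : Decidable (Pre_orient l i o) := by
  unfold Pre_orient; infer_instance

def pvWitness_orient : Int × Int × List (List Int) :=
  (2, 0, [[0,0,0,0,0,0,0,0,0,0,0,0,0,0,0,0], [1,2,0,3], [3]])

def Spec_orient (l : Int) (i : Int) (o : List (List Int)) (out : List (List Int)) : Prop := out = orient_alt l i o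
instance (l : Int) (i : Int) (o : List (List Int)) (out : List (List Int)) : Decidable (Spec_orient l i o out) := by unfold Spec_orient; infer_instance

-- ===== CLAIM (what is proved, stated in full; the proofs are below) =====
def Claim_equal_orient : Prop := ∀ (l : Int) (i : Int) (o : List (List Int)), Dom_orient l i o → Pre_orient l i o → Spec_orient l i o (orient l i o)

-- ===== LEMMAS AND PROOFS =====

-- the worklist machine simulates the recursion: popping a node and running on is running the
-- whole recursive call first (children are pushed in reverse, so the DFS order is identical)
theorem orientLoop_cons (n : Nat) : ∀ (l i : Int), l.toNat = n →
    ∀ (s : List (Int × Int)) (o : List (List Int)),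
    orientLoop ((l, i) :: s) o = orientLoop s (orient l i o) := by
  induction n using Nat.strong_induction_on with
  | _ n ih =>
    intro l i hn s o
    rw [orientLoop, orient]
    by_cases h : l - 1 > 0
    · simp only [dif_pos h]
      have hlt : (l - 1).toNat < n := by omega
      rw [ih _ hlt (l-1) (4*i) rfl, ih _ hlt (l-1) (4*i+1) rfl,
          ih _ hlt (l-1) (4*i+2) rfl, ih _ hlt (l-1) (4*i+3) rfl]
    · simp only [dif_neg h]

-- ===== VERDICT (by name: the statement is the Claim_ definition above) =====
theorem orient_spec : Claim_equal_orient := by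
  intro l i o _ _
  unfold Spec_orient orient_alt
  rw [orientLoop_cons l.toNat l i rfl, orientLoop]
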